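-- pv_equiv track=rewrite | github.com/DemchaAV/Food-list | scripts/migrations/update_menu_feb2026.py | find_insert_index
-- ===== SOURCE A (Python) =====
-- def find_insert_index(items_list, category, after_categories=None):
--     """Find the index to insert a new item at the end of its category group."""
--     last_idx = -1
--     for i, item in enumerate(items_list):
--         if item["category"] == category:
--             last_idx = i
--     if last_idx >= 0:
--         return last_idx + 1
--     return len(items_list)
-- ===== SOURCE B (Python) =====
-- def find_insert_index(items_list, category, after_categories=None):
--     """Find the index to insert a new item at the end of its category group."""
--     for i in range(len(items_list) - 1, -1, -1):
--         if items_list[i]["category"] == category: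
--             return i + 1
--     return len(items_list)
-- ===== Notes on version B (the rewrite author's own statement) =====
-- stated objective: idiomatic
-- what changed: B scans the list backwards and returns i+1 at the first (i.e. last-in-order) matching item via early return, eliminating A's last_idx accumulator and the post-loop branch.
import Mathlib
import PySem

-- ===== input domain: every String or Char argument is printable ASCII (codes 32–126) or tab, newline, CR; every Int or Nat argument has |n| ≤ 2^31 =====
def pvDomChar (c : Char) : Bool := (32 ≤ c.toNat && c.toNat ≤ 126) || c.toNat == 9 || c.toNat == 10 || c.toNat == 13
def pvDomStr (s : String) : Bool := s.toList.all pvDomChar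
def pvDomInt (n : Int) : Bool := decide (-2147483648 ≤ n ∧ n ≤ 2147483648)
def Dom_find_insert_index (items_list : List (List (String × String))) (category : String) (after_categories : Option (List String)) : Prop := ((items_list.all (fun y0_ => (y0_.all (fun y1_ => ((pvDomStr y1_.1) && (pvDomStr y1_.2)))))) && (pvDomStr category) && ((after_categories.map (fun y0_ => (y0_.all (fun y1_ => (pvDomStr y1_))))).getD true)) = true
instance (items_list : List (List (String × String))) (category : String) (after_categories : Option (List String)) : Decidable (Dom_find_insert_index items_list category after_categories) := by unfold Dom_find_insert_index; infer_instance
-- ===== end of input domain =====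

-- B replaces A's forward scan with a last_idx accumulator and a post-loop branch by a
-- backward scan with an early return at the first match (idiomatic; same O(n) cost).

-- ===== PORT A =====
-- item["category"]: first-match association-list lookup (KeyError = none, excluded by Pre_)
def pvCat (item : List (String × String)) : Option String := item.lookup "category"

def find_insert_index (items_list : List (List (String × String))) (category : String) (after_categories : Option (List String)) : Int :=
  let last_idx : Int :=
    (PySem.List.enumerate items_list).foldl
      (fun acc p => if pvCat p.2 = some category then p.1 else acc) (-1)
  if last_idx ≥ 0 then last_idx + 1 else (items_list.length : Int)

-- ===== PORT B =====
-- backward scan over the reversed enumeration; n is len(items_list), returned when no item matches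
def pvAltGo (category : String) (n : Int) : List (Int × List (String × String)) → Int
  | [] => n
  | p :: rest => if pvCat p.2 = some category then p.1 + 1 else pvAltGo category n rest

def find_insert_index_alt (items_list : List (List (String × String))) (category : String) (after_categories : Option (List String)) : Int :=
  pvAltGo category (items_list.length : Int) (PySem.List.enumerate items_list).reverse

-- ===== PRECONDITION & SPEC =====
-- Pre_ excludes inputs where some item lacks the "category" key, on which Python A raises KeyError.
def Pre_find_insert_index (items_list : List (List (String × String))) (category : String) (after_categories : Option (List String)) : Prop :=
  items_list.all (fun item => (item.lookup "category").isSome) = true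
instance (items_list : List (List (String × String))) (category : String) (after_categories : Option (List String)) : Decidable (Pre_find_insert_index items_list category after_categories) := by unfold Pre_find_insert_index; infer_instance

def pvWitness_find_insert_index : (List (List (String × String))) × String × Option (List String) :=
  ([[("category", "soup")], [("category", "salad"), ("name", "x")]], "soup", none)

def Spec_find_insert_index (items_list : List (List (String × String))) (category : String) (after_categories : Option (List String)) (out : Int) : Prop := out = find_insert_index_alt items_list category after_categories
instance (items_list : List (List (String × String))) (category : String) (after_categories : Option (List String)) (out : Int) : Decidable (Spec_find_insert_index items_list category after_categories out) := by unfold Spec_find_insert_index; infer_instance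

-- ===== CLAIM (what is proved, stated in full; the proofs are below) =====
def Claim_equal_find_insert_index : Prop := ∀ (items_list : List (List (String × String))) (category : String) (after_categories : Option (List String)), Dom_find_insert_index items_list category after_categories → Pre_find_insert_index items_list category after_categories → Spec_find_insert_index items_list category after_categories (find_insert_index items_list category after_categories)

-- ===== LEMMAS AND PROOFS =====

theorem pv_key (category : String) (l : List (List (String × String))) (n : Int) :
    (let last := (PySem.List.enumerate l).foldl
        (fun acc p => if pvCat p.2 = some category then p.1 else acc) (-1 : Int);
     if last ≥ 0 then last + 1 else n)
    = pvAltGo category n (PySem.List.enumerate l).reverse := by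
  induction l using List.reverseRecOn generalizing n with
  | nil => simp [PySem.List.enumerate_nil, pvAltGo]
  | append_singleton xs x ih =>
    rw [PySem.List.enumerate_append]
    simp only [List.foldl_append, List.reverse_append, PySem.List.enumerate_cons,
      PySem.List.enumerate_nil, List.foldl_cons, List.foldl_nil, List.reverse_cons,
      List.reverse_nil, List.nil_append, List.cons_append, pvAltGo]
    by_cases h : pvCat x = some category
    · simp only [h]
      simp [show ((0:Int) + xs.length) ≥ 0 from by positivity]
    · simp only [if_neg h]
      exact ih n

theorem find_insert_index_eq (items_list : List (List (String × String))) (category : String) (after_categories : Option (List String)) :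
    find_insert_index items_list category after_categories
      = find_insert_index_alt items_list category after_categories := by
  unfold find_insert_index find_insert_index_alt
  exact pv_key category items_list _

-- ===== VERDICT (by name: the statement is the Claim_ definition above) =====
theorem find_insert_index_spec : Claim_equal_find_insert_index := by
  intro items_list category after_categories _ _
  unfold Spec_find_insert_index
  exact find_insert_index_eq items_list category after_categories
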